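-- pv_equiv track=rewrite | github.com/981377660LMT/algorithm-study | 0_数组/数组api/getNextIndex.py | getPrevAndNextIndex
-- ===== SOURCE A (Python) =====
-- from typing import List, Tuple
--
-- def getPrevAndNextIndex(arr: List[int]) -> Tuple[List[int], List[int]]:
--     """
--     获取数组中相同元素的前一个和后一个元素的位置.不存在则返回-1.
--     """
--     n = len(arr)
--     left, right = [0] * n, [-1] * n
--     last = dict()
--     for i, x in enumerate(arr):
--         left[i] = j = last.get(x, -1)
--         if j >= 0:
--             right[j] = i
--         last[x] = i
--     return left, right
-- ===== SOURCE B (Python) =====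
-- def getPrevAndNextIndex(arr):
--     """
--     获取数组中相同元素的前一个和后一个元素的位置.不存在则返回-1.
--     """
--     left = []
--     last = {}
--     for i, x in enumerate(arr):
--         left.append(last.get(x, -1))
--         last[x] = i
--     right_rev = []
--     nxt = {}
--     for i, x in reversed(list(enumerate(arr))):
--         right_rev.append(nxt.get(x, -1))
--         nxt[x] = i
--     return left, right_rev[::-1]
-- ===== Notes on version B (the rewrite author's own statement) =====
-- stated objective: alternative
-- what changed: B computes left and right in two independent passes: a forward append-only pass for previous indices and a backward pass (over the reversed enumeration, building the result back-to-front) for next indices, instead of A's single forward pass that retro-writes right[j] at in-place positions.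
import Mathlib
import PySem

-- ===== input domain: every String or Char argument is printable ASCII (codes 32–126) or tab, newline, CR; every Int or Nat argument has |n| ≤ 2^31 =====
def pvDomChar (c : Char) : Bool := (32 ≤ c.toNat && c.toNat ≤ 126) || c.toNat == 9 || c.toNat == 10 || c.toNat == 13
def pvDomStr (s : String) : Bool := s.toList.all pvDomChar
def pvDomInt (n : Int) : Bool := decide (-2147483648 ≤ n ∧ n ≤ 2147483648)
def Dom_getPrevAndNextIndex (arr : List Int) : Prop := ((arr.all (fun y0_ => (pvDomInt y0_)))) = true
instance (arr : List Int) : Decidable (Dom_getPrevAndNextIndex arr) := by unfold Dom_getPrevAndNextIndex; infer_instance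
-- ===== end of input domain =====

-- B computes prev/next same-element indices in two independent passes (forward append-only
-- pass for `left`, backward pass building `right` back-to-front) instead of A's single
-- forward pass with in-place retro-writes; same O(n) cost, different loop structure.

-- ===== PORT A =====
-- loop body of A: left[i] = j = last.get(x,-1); if j >= 0: right[j] = i; last[x] = i
def stepA (st : List Int × List Int × PySem.Dict Int Int) (ix : Int × Int) :
    List Int × List Int × PySem.Dict Int Int :=
  let j := st.2.2.getD ix.2 (-1)
  (st.1.set ix.1.toNat j,
   (if 0 ≤ j then st.2.1.set j.toNat ix.1 else st.2.1),
   st.2.2.insert ix.2 ix.1)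

def getPrevAndNextIndex (arr : List Int) : List Int × List Int :=
  let n := arr.length
  let res := (PySem.List.enumerate arr).foldl stepA
    (List.replicate n (0 : Int), List.replicate n (-1 : Int), PySem.Dict.empty)
  (res.1, res.2.1)

-- ===== PORT B =====
-- loop body of both of B's passes: out.append(d.get(x,-1)); d[x] = i
def stepB (st : List Int × PySem.Dict Int Int) (ix : Int × Int) :
    List Int × PySem.Dict Int Int :=
  (st.1 ++ [st.2.getD ix.2 (-1)], st.2.insert ix.2 ix.1)

def getPrevAndNextIndex_alt (arr : List Int) : List Int × List Int :=
  let fw := (PySem.List.enumerate arr).foldl stepB ([], PySem.Dict.empty)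
  let bw := ((PySem.List.enumerate arr).reverse).foldl stepB ([], PySem.Dict.empty)
  (fw.1, bw.1.reverse)

-- ===== PRECONDITION & SPEC =====
def Spec_getPrevAndNextIndex (arr : List Int) (out : List Int × List Int) : Prop := out = getPrevAndNextIndex_alt arr
instance (arr : List Int) (out : List Int × List Int) : Decidable (Spec_getPrevAndNextIndex arr out) := by unfold Spec_getPrevAndNextIndex; infer_instance

-- ===== CLAIM (what is proved, stated in full; the proofs are below) =====
def Claim_equal_getPrevAndNextIndex : Prop := ∀ (arr : List Int), Dom_getPrevAndNextIndex arr → Spec_getPrevAndNextIndex arr (getPrevAndNextIndex arr)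

-- ===== LEMMAS AND PROOFS =====

-- last index j < k with arr[j] = x, else -1
def pvLastB (arr : List Int) (k : Nat) (x : Int) : Int :=
  match k with
  | 0 => -1
  | k + 1 => if arr.getD k 0 = x then (k : Int) else pvLastB arr k x

-- first index q with t ≤ q < arr.length and arr[q] = x, else -1
def pvFirstF (arr : List Int) (t : Nat) (x : Int) : Int :=
  if h : t < arr.length then
    (if arr.getD t 0 = x then (t : Int) else pvFirstF arr (t + 1) x)
  else -1
termination_by arr.length - t

lemma pvLastB_lt (arr : List Int) (k : Nat) (x : Int) : pvLastB arr k x < (k : Int) := by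
  induction k with
  | zero => simp [pvLastB]
  | succ k ih =>
    simp only [pvLastB]
    split_ifs with h
    · push_cast; omega
    · have := ih; omega

lemma pvLastB_mem (arr : List Int) (k : Nat) (x : Int) (h : 0 ≤ pvLastB arr k x) :
    arr.getD (pvLastB arr k x).toNat 0 = x := by
  induction k with
  | zero => simp [pvLastB] at h
  | succ k ih =>
    simp only [pvLastB] at h ⊢
    split_ifs at h ⊢ with hx
    · simpa using hx
    · exact ih h

lemma pvLastB_max (arr : List Int) (k : Nat) (x : Int) (q : Nat) (hq : q < k)
    (hx : arr.getD q 0 = x) : (q : Int) ≤ pvLastB arr k x := by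
  induction k with
  | zero => omega
  | succ k ih =>
    simp only [pvLastB]
    split_ifs with h
    · push_cast; omega
    · have hqk : q < k := by
        rcases Nat.lt_succ_iff_lt_or_eq.mp hq with h' | h'
        · exact h'
        · subst h'; exact absurd hx h
      exact ih hqk

lemma pvFirstF_cases (arr : List Int) (t : Nat) (x : Int) :
    0 ≤ pvFirstF arr t x ∨ pvFirstF arr t x = -1 := by
  fun_induction pvFirstF with
  | case1 => left; positivity
  | case2 t h hx ih => exact ih
  | case3 => right; rfl

lemma pvFirstF_lt_len (arr : List Int) (t : Nat) (x : Int) :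
    pvFirstF arr t x < (arr.length : Int) ∨ pvFirstF arr t x = -1 := by
  fun_induction pvFirstF with
  | case1 t h hx => left; exact_mod_cast h
  | case2 t h hx ih => exact ih
  | case3 => right; rfl

lemma pvFirstF_ge (arr : List Int) (t : Nat) (x : Int) (h : 0 ≤ pvFirstF arr t x) :
    (t : Int) ≤ pvFirstF arr t x := by
  fun_induction pvFirstF with
  | case1 => omega
  | case2 t ht hx ih =>
    have := ih (by simpa using h)
    push_cast at this ⊢; omega
  | case3 => omega

lemma pvFirstF_mem (arr : List Int) (t : Nat) (x : Int) (h : 0 ≤ pvFirstF arr t x) :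
    arr.getD (pvFirstF arr t x).toNat 0 = x := by
  fun_induction pvFirstF with
  | case1 t ht hx => simpa using hx
  | case2 t ht hx ih => exact ih (by simpa using h)
  | case3 => omega

lemma pvFirstF_min (arr : List Int) (t : Nat) (x : Int) (q : Nat) (ht : t ≤ q)
    (hq : q < arr.length) (hx : arr.getD q 0 = x) :
    0 ≤ pvFirstF arr t x ∧ pvFirstF arr t x ≤ (q : Int) := by
  fun_induction pvFirstF with
  | case1 t h hx' => constructor <;> [positivity; exact_mod_cast ht]
  | case2 t h hx' ih =>
    have htq : t + 1 ≤ q := by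
      rcases Nat.eq_or_lt_of_le ht with h' | h'
      · subst h'; exact absurd hx hx'
      · omega
    exact ih htq
  | case3 t h => omega

-- the bridge between A's retro-write position and B's backward-pass value:
-- for k < n, pvFirstF arr (p+1) (arr[p]) = k exactly when p is A's pending index j = lastB arr k (arr[k])
lemma pv_key (arr : List Int) (k p : Nat) (hk : k < arr.length) (hp : p < arr.length) :
    pvFirstF arr (p + 1) (arr.getD p 0) = (k : Int) ↔ (p : Int) = pvLastB arr k (arr.getD k 0) := by
  constructor
  · intro hf
    have h0 : 0 ≤ pvFirstF arr (p + 1) (arr.getD p 0) := by rw [hf]; positivity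
    have hmem := pvFirstF_mem arr (p + 1) (arr.getD p 0) h0
    rw [hf] at hmem
    simp only [Int.toNat_natCast] at hmem
    -- hmem : arr.getD k 0 = arr.getD p 0
    have hge := pvFirstF_ge arr (p + 1) (arr.getD p 0) h0
    rw [hf] at hge
    have hpk : p < k := by exact_mod_cast (by push_cast at hge; omega : (p : Int) < k)
    -- p is an occurrence of arr[k] below k, so lastB ≥ p
    have hmax : (p : Int) ≤ pvLastB arr k (arr.getD k 0) := pvLastB_max arr k _ p hpk hmem.symm
    -- lastB < k, lastB ≥ 0; let j := lastB
    set j : Int := pvLastB arr k (arr.getD k 0) with hj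
    have hjlt : j < (k : Int) := pvLastB_lt arr k _
    have hj0 : 0 ≤ j := le_trans (by positivity) hmax
    have hjmem : arr.getD j.toNat 0 = arr.getD k 0 := pvLastB_mem arr k _ hj0
    -- if p < j then arr[j] = arr[p] with p+1 ≤ j < k contradicts minimality (pvFirstF = k ≤ j)
    by_contra hne
    have hplt : (p : Int) < j := lt_of_le_of_ne hmax hne
    have hjn : j.toNat < arr.length := by omega
    have := pvFirstF_min arr (p + 1) (arr.getD p 0) j.toNat (by omega) hjn (by rw [hjmem, hmem])
    rw [hf] at this
    omega
  · intro hpj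
    set j : Int := pvLastB arr k (arr.getD k 0) with hj
    have hj0 : 0 ≤ j := by rw [← hpj]; positivity
    have hjmem : arr.getD j.toNat 0 = arr.getD k 0 := pvLastB_mem arr k _ hj0
    have hptoj : j.toNat = p := by omega
    rw [hptoj] at hjmem
    have hjlt : j < (k : Int) := pvLastB_lt arr k _
    have hpk : p < k := by omega
    -- arr[k] = arr[p], k ≥ p+1, so pvFirstF from p+1 is ≥ 0 and ≤ k
    obtain ⟨h0, hle⟩ := pvFirstF_min arr (p + 1) (arr.getD p 0) k (by omega) hk (by rw [hjmem])
    -- and it cannot be < k: that occurrence would contradict maximality of j = p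
    set f : Int := pvFirstF arr (p + 1) (arr.getD p 0) with hfdef
    rcases lt_or_eq_of_le hle with hlt | heq
    · exfalso
      have hflt : f < (arr.length : Int) := by
        rcases pvFirstF_lt_len arr (p + 1) (arr.getD p 0) with h | h
        · exact h
        · omega
      have hfmem : arr.getD f.toNat 0 = arr.getD p 0 := pvFirstF_mem arr (p + 1) _ h0
      have hfge : (p + 1 : Int) ≤ f := by
        have := pvFirstF_ge arr (p + 1) (arr.getD p 0) h0; push_cast at this; omega
      have hmax : (f.toNat : Int) ≤ pvLastB arr k (arr.getD k 0) := by
        apply pvLastB_max arr k _ f.toNat (by omega)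
        rw [hfmem, hjmem]
      rw [← hj, ← hpj] at hmax
      omega
    · exact heq

-- ==== A's loop invariant ====

def pvInitA (arr : List Int) : List Int × List Int × PySem.Dict Int Int :=
  (List.replicate arr.length (0 : Int), List.replicate arr.length (-1 : Int), PySem.Dict.empty)

def pvInvA (arr : List Int) (k : Nat) (st : List Int × List Int × PySem.Dict Int Int) : Prop :=
  st.1.length = arr.length ∧ st.2.1.length = arr.length ∧
  (∀ p, p < arr.length → st.1.getD p 0 =
      if p < k then pvLastB arr p (arr.getD p 0) else 0) ∧
  (∀ p, p < arr.length → st.2.1.getD p 0 =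
      if 0 ≤ pvFirstF arr (p + 1) (arr.getD p 0) ∧ pvFirstF arr (p + 1) (arr.getD p 0) < (k : Int)
      then pvFirstF arr (p + 1) (arr.getD p 0) else -1) ∧
  (∀ x, st.2.2.getD x (-1) = pvLastB arr k x)

lemma pvA_inv (arr : List Int) (k : Nat) (hk : k ≤ arr.length) :
    pvInvA arr k (((PySem.List.enumerate arr).take k).foldl stepA (pvInitA arr)) := by
  induction k with
  | zero =>
    refine ⟨by simp [pvInitA], by simp [pvInitA], ?_, ?_, ?_⟩
    · intro p hp; simp [pvInitA, hp]
    · intro p hp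
      have : ¬ (0 ≤ pvFirstF arr (p + 1) (arr.getD p 0) ∧ pvFirstF arr (p + 1) (arr.getD p 0) < (0 : Int)) := by omega
      simp [pvInitA, hp]
    · intro x; simp [pvInitA, pvLastB]
  | succ k ih =>
    have hk' : k < arr.length := by omega
    have ihh := ih (by omega)
    have hkl : k < (PySem.List.enumerate arr).length := by
      rwa [PySem.List.length_enumerate]
    have htake : (PySem.List.enumerate arr).take (k + 1)
        = (PySem.List.enumerate arr).take k ++ [((k : Int), arr[k])] := by
      rw [List.take_succ, List.getElem?_eq_getElem hkl]
      simp [PySem.List.getElem_enumerate]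
    rw [htake, List.foldl_append]
    obtain ⟨hl, hr, hleft, hright, hd⟩ := ihh
    set st := ((PySem.List.enumerate arr).take k).foldl stepA (pvInitA arr) with hst
    simp only [List.foldl_cons, List.foldl_nil]
    have hx : arr[k] = arr.getD k 0 := (List.getD_eq_getElem arr 0 hk').symm
    have hj : st.2.2.getD arr[k] (-1) = pvLastB arr k (arr.getD k 0) := by rw [hx]; exact hd _
    refine ⟨?_, ?_, ?_, ?_, ?_⟩
    · simp [stepA, hl]
    · simp only [stepA]
      split_ifs with h <;> simp [hr]
    · intro p hp
      simp only [stepA, hj, Int.toNat_natCast]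
      rcases eq_or_ne p k with rfl | hne
      · rw [List.getD_eq_getElem _ 0 (by simpa [hl] using hp),
            List.getElem_set_self (by simpa [hl] using hp)]
        rw [if_pos (Nat.lt_succ_self _)]
      · have : (List.set st.1 k (pvLastB arr k (arr.getD k 0))).getD p 0 = st.1.getD p 0 := by
          rw [List.getD_eq_getElem _ 0 (by simpa [hl] using hp),
              List.getElem_set_ne (by omega), ← List.getD_eq_getElem _ 0 (by simpa [hl] using hp)]
        rw [this, hleft p hp]
        have : p < k ↔ p < k + 1 := by omega
        simp [this]
    · intro p hp
      simp only [stepA, hj]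
      set f : Int := pvFirstF arr (p + 1) (arr.getD p 0) with hfdef
      by_cases hcase : (p : Int) = pvLastB arr k (arr.getD k 0)
      -- p is the retro-write target: f = k by the key lemma
      · have hf : f = (k : Int) := (pv_key arr k p hk' hp).mpr hcase
        have h0 : 0 ≤ pvLastB arr k (arr.getD k 0) := by rw [← hcase]; positivity
        rw [if_pos h0]
        have htn : (pvLastB arr k (arr.getD k 0)).toNat = p := by omega
        rw [htn, List.getD_eq_getElem _ 0 (by
              simpa [List.length_set, hr] using hp),
            List.getElem_set_self (by simpa [hr] using hp)]
        rw [hf, if_pos (by push_cast; omega)]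
      -- p untouched: f ≠ k, so the window condition is unchanged
      · have hfne : f ≠ (k : Int) := fun h => hcase ((pv_key arr k p hk' hp).mp h)
        have hunch :
            (if 0 ≤ pvLastB arr k (arr.getD k 0) then
              List.set st.2.1 (pvLastB arr k (arr.getD k 0)).toNat (k : Int) else st.2.1).getD p 0
            = st.2.1.getD p 0 := by
          split_ifs with h0
          · have hne' : (pvLastB arr k (arr.getD k 0)).toNat ≠ p := by
              intro h; apply hcase; omega
            rw [List.getD_eq_getElem _ 0 (by simpa [List.length_set, hr] using hp),
                List.getElem_set_ne hne', ← List.getD_eq_getElem _ 0 (by simpa [hr] using hp)]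
          · rfl
        rw [hunch, hright p hp]
        have : (0 ≤ f ∧ f < (k : Int)) ↔ (0 ≤ f ∧ f < ((k + 1 : Nat) : Int)) := by
          push_cast; omega
        simp only [← hfdef]
        rw [if_congr this rfl rfl]
    · intro x
      simp only [stepA, PySem.Dict.getD_insert]
      rcases eq_or_ne x arr[k] with rfl | hne
      · simp [pvLastB, hx]
      · rw [if_neg hne, hd x]
        simp only [pvLastB]
        rw [if_neg (by rw [← hx]; exact fun h => hne h.symm)]

-- ==== B's forward-pass invariant ====

def pvInvBF (arr : List Int) (k : Nat) (st : List Int × PySem.Dict Int Int) : Prop :=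
  st.1 = (List.range k).map (fun p => pvLastB arr p (arr.getD p 0)) ∧
  (∀ x, st.2.getD x (-1) = pvLastB arr k x)

lemma pvB_fw (arr : List Int) (k : Nat) (hk : k ≤ arr.length) :
    pvInvBF arr k (((PySem.List.enumerate arr).take k).foldl stepB ([], PySem.Dict.empty)) := by
  induction k with
  | zero => exact ⟨by simp, fun x => by simp [pvLastB]⟩
  | succ k ih =>
    have hk' : k < arr.length := by omega
    have hkl : k < (PySem.List.enumerate arr).length := by rwa [PySem.List.length_enumerate]
    have htake : (PySem.List.enumerate arr).take (k + 1)
        = (PySem.List.enumerate arr).take k ++ [((k : Int), arr[k])] := by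
      rw [List.take_succ, List.getElem?_eq_getElem hkl]
      simp [PySem.List.getElem_enumerate]
    rw [htake, List.foldl_append]
    obtain ⟨hacc, hd⟩ := ih (by omega)
    set st := ((PySem.List.enumerate arr).take k).foldl stepB ([], PySem.Dict.empty) with hst
    simp only [List.foldl_cons, List.foldl_nil]
    have hx : arr[k] = arr.getD k 0 := (List.getD_eq_getElem arr 0 hk').symm
    constructor
    · simp only [stepB, hacc, hd, List.range_succ, List.map_append, List.map_cons, List.map_nil, hx]
    · intro x
      simp only [stepB, PySem.Dict.getD_insert]
      rcases eq_or_ne x arr[k] with rfl | hne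
      · simp [pvLastB, hx]
      · rw [if_neg hne, hd x]
        simp only [pvLastB]
        rw [if_neg (by rw [← hx]; exact fun h => hne h.symm)]

-- ==== B's backward-pass invariant ====

def pvInvBB (arr : List Int) (k : Nat) (st : List Int × PySem.Dict Int Int) : Prop :=
  st.1 = ((List.range' (arr.length - k) k).reverse).map
           (fun p => pvFirstF arr (p + 1) (arr.getD p 0)) ∧
  (∀ x, st.2.getD x (-1) = pvFirstF arr (arr.length - k) x)

lemma pvB_bw (arr : List Int) (k : Nat) (hk : k ≤ arr.length) :
    pvInvBB arr k ((((PySem.List.enumerate arr).drop (arr.length - k)).reverse).foldl stepB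
      ([], PySem.Dict.empty)) := by
  induction k with
  | zero =>
    have h0 : (PySem.List.enumerate arr).drop (arr.length - 0) = [] := by
      have hlen : arr.length = (PySem.List.enumerate arr).length :=
        (PySem.List.length_enumerate arr 0).symm
      rw [Nat.sub_zero, hlen, List.drop_length]
    rw [h0]
    constructor
    · simp
    · intro x
      simp only [Nat.sub_zero]
      rw [pvFirstF, dif_neg (by omega)]
      simp
  | succ k ih =>
    have hk' : k ≤ arr.length := by omega
    set t := arr.length - (k + 1) with ht
    have htlt : t < arr.length := by omega
    have htl : t < (PySem.List.enumerate arr).length := by rwa [PySem.List.length_enumerate]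
    have hdrop : (PySem.List.enumerate arr).drop t
        = ((t : Int), arr[t]) :: (PySem.List.enumerate arr).drop (t + 1) := by
      rw [List.drop_eq_getElem_cons htl]
      simp [PySem.List.getElem_enumerate]
    have ht1 : t + 1 = arr.length - k := by omega
    rw [hdrop, List.reverse_cons, List.foldl_append]
    obtain ⟨hacc, hd⟩ := ih hk'
    rw [← ht1] at hacc hd
    set st := (((PySem.List.enumerate arr).drop (t + 1)).reverse).foldl stepB
      ([], PySem.Dict.empty) with hst
    simp only [List.foldl_cons, List.foldl_nil]
    have hx : arr[t] = arr.getD t 0 := (List.getD_eq_getElem arr 0 htlt).symm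
    have hrange : List.range' t (k + 1) = t :: List.range' (t + 1) k := List.range'_succ
    have htg : arr.length - (k + 1) = t := ht.symm
    simp only [pvInvBB, htg]
    refine ⟨?_, ?_⟩
    · simp only [stepB, hacc, hd, hrange, List.reverse_cons, List.map_append, List.map_cons,
        List.map_nil, hx]
    · intro x
      simp only [stepB, PySem.Dict.getD_insert]
      rw [pvFirstF, dif_pos htlt]
      rcases eq_or_ne x arr[t] with rfl | hne
      · rw [if_pos rfl, if_pos hx.symm]
      · rw [if_neg hne, hd x, if_neg (by rw [← hx]; exact fun h => hne h.symm)]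

-- ==== assembly ====

lemma pv_take_all (arr : List Int) :
    (PySem.List.enumerate arr).take arr.length = PySem.List.enumerate arr := by
  rw [List.take_of_length_le (by rw [PySem.List.length_enumerate])]

-- A's right entry simplifies: the window condition at k = n is automatic
lemma pv_right_entry (arr : List Int) (p : Nat) :
    (if 0 ≤ pvFirstF arr (p + 1) (arr.getD p 0)
        ∧ pvFirstF arr (p + 1) (arr.getD p 0) < (arr.length : Int)
     then pvFirstF arr (p + 1) (arr.getD p 0) else -1)
    = pvFirstF arr (p + 1) (arr.getD p 0) := by
  rcases pvFirstF_cases arr (p + 1) (arr.getD p 0) with h0 | hneg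
  · rcases pvFirstF_lt_len arr (p + 1) (arr.getD p 0) with hlt | hm1
    · rw [if_pos ⟨h0, hlt⟩]
    · omega
  · rw [hneg, if_neg (by omega)]

-- ===== VERDICT (by name: the statement is the Claim_ definition above) =====
theorem getPrevAndNextIndex_spec : Claim_equal_getPrevAndNextIndex := by
  intro arr _
  unfold Spec_getPrevAndNextIndex getPrevAndNextIndex getPrevAndNextIndex_alt
  have hA := pvA_inv arr arr.length le_rfl
  have hBF := pvB_fw arr arr.length le_rfl
  have hBB := pvB_bw arr arr.length le_rfl
  rw [pv_take_all] at hA hBF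
  rw [Nat.sub_self, List.drop_zero] at hBB
  obtain ⟨hl, hr, hleft, hright, _⟩ := hA
  obtain ⟨haccF, _⟩ := hBF
  obtain ⟨haccB, _⟩ := hBB
  set stA := (PySem.List.enumerate arr).foldl stepA (pvInitA arr) with hstA
  refine Prod.ext ?_ ?_
  · -- left components
    show stA.1 = (List.foldl stepB ([], PySem.Dict.empty) (PySem.List.enumerate arr)).1
    rw [haccF]
    apply List.ext_getElem
    · simp [hl]
    · intro p h1 h2
      have hp : p < arr.length := by simpa [hl] using h1
      have := hleft p hp
      rw [List.getD_eq_getElem _ 0 h1, if_pos hp] at this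
      rw [this]
      simp [hp]
  · -- right components
    show stA.2.1 =
      ((List.foldl stepB ([], PySem.Dict.empty) (PySem.List.enumerate arr).reverse)).1.reverse
    rw [haccB, Nat.sub_self, List.map_reverse, List.reverse_reverse, ← List.range_eq_range']
    apply List.ext_getElem
    · simp [hr]
    · intro p h1 h2
      have hp : p < arr.length := by simpa [hr] using h1
      have := hright p hp
      rw [List.getD_eq_getElem _ 0 h1, pv_right_entry] at this
      rw [this]
      simp [hp]
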